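-- pv_equiv track=rewrite | github.com/kube-dojo/kube-dojo | scripts/check_reader_aids.py | count_timeline_events
-- ===== SOURCE A (Python) =====
-- def count_timeline_events(block: list[str]) -> int:
--     """Inside a mermaid timeline, lines like `2024 : event` or `Q1 2024 : event` are events."""
--     in_mermaid = False
--     n = 0
--     for ln in block:
--         s = ln.strip()
--         if s.startswith("```mermaid"):
--             in_mermaid = True
--             continue
--         if s.startswith("```") and in_mermaid:
--             in_mermaid = False
--             continue
--         if not in_mermaid:
--             continue
--         # event lines look like `<label> : <text>` and aren't `title …`
--         if s.startswith("title"):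
--             continue
--         if " : " in s:
--             n += 1
--     return n
-- ===== SOURCE B (Python) =====
-- def _is_open(s):
--     return s.startswith("```mermaid")
--
--
-- def _is_close(s):
--     return s.startswith("```") and not s.startswith("```mermaid")
--
--
-- def _is_event(s):
--     return not s.startswith("```mermaid") and not s.startswith("title") and " : " in s
--
--
-- def _drop_to_open(lines):
--     """Suffix just after the first opening fence, or None if there is no fence."""
--     for k, s in enumerate(lines):
--         if _is_open(s):
--             return lines[k + 1:]
--     return None
--
--
-- def _split_close(lines):
--     """(segment before the first closing fence, suffix after it)."""
--     for k, s in enumerate(lines):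
--         if _is_close(s):
--             return lines[:k], lines[k + 1:]
--     return lines, []
--
--
-- def count_timeline_events(block: list[str]) -> int:
--     """Segment-splitting: strip once, then repeatedly cut out the next fenced
--     segment and count its event lines, instead of toggling a flag per line."""
--     lines = [ln.strip() for ln in block]
--     total = 0
--     while True:
--         opened = _drop_to_open(lines)
--         if opened is None:
--             return total
--         seg, lines = _split_close(opened)
--         total += sum(1 for s in seg if _is_event(s))
-- ===== Notes on version B (the rewrite author's own statement) =====
-- stated objective: alternative
-- what changed: A's single per-line scan with an in_mermaid flag is replaced by a segment-splitting algorithm: strip all lines once, then repeatedly locate the next opening fence, split off the fenced segment up to its closing fence, and count each whole segment's event lines at once.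
import Mathlib
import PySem

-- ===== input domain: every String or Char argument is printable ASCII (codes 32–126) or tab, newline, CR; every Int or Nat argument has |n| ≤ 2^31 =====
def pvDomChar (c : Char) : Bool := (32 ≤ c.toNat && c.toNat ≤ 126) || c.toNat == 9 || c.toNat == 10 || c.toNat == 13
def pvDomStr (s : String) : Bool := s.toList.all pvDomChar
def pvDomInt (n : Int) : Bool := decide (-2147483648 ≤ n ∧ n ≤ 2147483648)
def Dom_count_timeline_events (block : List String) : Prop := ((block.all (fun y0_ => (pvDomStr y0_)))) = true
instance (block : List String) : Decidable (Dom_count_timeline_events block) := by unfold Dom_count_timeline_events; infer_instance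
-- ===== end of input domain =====

-- B replaces A's per-line flag-toggling counter by a segment-splitting scan (cut out each fenced segment, count its events at once); same cost, alternative structure.


-- ===== PORT A =====
-- one iteration of A's for-loop, state = (in_mermaid, n); strips inside the loop as A does
def pvStepA (st : Bool × Int) (ln : String) : Bool × Int :=
  let s := PySem.Str.strip ln
  if PySem.Str.startswith s "```mermaid" then (true, st.2)
  else if PySem.Str.startswith s "```" && st.1 then (false, st.2)
  else if !st.1 then st
  else if PySem.Str.startswith s "title" then st
  else if PySem.Str.isIn " : " s then (st.1, st.2 + 1)
  else st

def count_timeline_events (block : List String) : Int :=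
  (block.foldl pvStepA (false, 0)).2

-- ===== PORT B =====
def pvIsOpen (s : String) : Bool := PySem.Str.startswith s "```mermaid"

def pvIsClose (s : String) : Bool :=
  PySem.Str.startswith s "```" && !PySem.Str.startswith s "```mermaid"

def pvIsEvent (s : String) : Bool :=
  !PySem.Str.startswith s "```mermaid" && !PySem.Str.startswith s "title" &&
    PySem.Str.isIn " : " s

-- suffix just after the first opening fence, or none
def pvDropToOpen : List String → Option (List String)
  | [] => none
  | s :: rest => if pvIsOpen s then some rest else pvDropToOpen rest

-- (segment before the first closing fence, suffix after it)
def pvSplitClose : List String → List String × List String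
  | [] => ([], [])
  | s :: rest =>
    if pvIsClose s then ([], rest)
    else
      let p := pvSplitClose rest
      (s :: p.1, p.2)

theorem pvDropToOpen_len : ∀ (l r : List String), pvDropToOpen l = some r → r.length < l.length := by
  intro l
  induction l with
  | nil => intro r h; simp [pvDropToOpen] at h
  | cons s rest ih =>
    intro r h
    simp only [pvDropToOpen] at h
    split at h
    · cases h; simp
    · exact Nat.lt_trans (ih r h) (by simp)

theorem pvSplitClose_len : ∀ (l : List String), (pvSplitClose l).2.length ≤ l.length := by
  intro l
  induction l with
  | nil => simp [pvSplitClose]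
  | cons s rest ih =>
    simp only [pvSplitClose]
    split
    · simp
    · simpa using Nat.le_trans ih (by simp)

-- B's driving loop: repeatedly cut out the next fenced segment and count it
def pvScan (lines : List String) : Int :=
  match h : pvDropToOpen lines with
  | none => 0
  | some opened =>
    let p := pvSplitClose opened
    (p.1.countP pvIsEvent : Int) + pvScan p.2
termination_by lines.length
decreasing_by
  exact Nat.lt_of_le_of_lt (pvSplitClose_len opened) (pvDropToOpen_len lines opened h)

def count_timeline_events_alt (block : List String) : Int :=
  pvScan (block.map PySem.Str.strip)

-- ===== PRECONDITION & SPEC =====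
def Spec_count_timeline_events (block : List String) (out : Int) : Prop := out = count_timeline_events_alt block
instance (block : List String) (out : Int) : Decidable (Spec_count_timeline_events block out) := by unfold Spec_count_timeline_events; infer_instance

-- ===== CLAIM (what is proved, stated in full; the proofs are below) =====
def Claim_equal_count_timeline_events : Prop := ∀ (block : List String), Dom_count_timeline_events block → Spec_count_timeline_events block (count_timeline_events block)

-- ===== LEMMAS AND PROOFS =====
theorem pvScan_eq (lines : List String) : pvScan lines =
    match pvDropToOpen lines with
    | none => 0
    | some opened =>
      ((pvSplitClose opened).1.countP pvIsEvent : Int) + pvScan (pvSplitClose opened).2 := by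
  rw [pvScan]
  cases hd : pvDropToOpen lines <;> simp

theorem pvScan_cons_open (s : String) (rest : List String) (h : pvIsOpen s = true) :
    pvScan (s :: rest) =
      ((pvSplitClose rest).1.countP pvIsEvent : Int) + pvScan (pvSplitClose rest).2 := by
  rw [pvScan_eq]; simp [pvDropToOpen, h]

theorem pvScan_cons_not_open (s : String) (rest : List String) (h : pvIsOpen s = false) :
    pvScan (s :: rest) = pvScan rest := by
  rw [pvScan_eq, pvScan_eq (lines := rest)]; simp [pvDropToOpen, h]

-- A's loop body re-expressed through B's three line classifiers (pure Bool case analysis)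
theorem pvStepA_eq (st : Bool × Int) (ln : String) :
    pvStepA st ln =
      (if pvIsOpen (PySem.Str.strip ln) then (true, st.2)
       else if pvIsClose (PySem.Str.strip ln) && st.1 then (false, st.2)
       else if !st.1 then st
       else if PySem.Str.startswith (PySem.Str.strip ln) "title" then st
       else if PySem.Str.isIn " : " (PySem.Str.strip ln) then (st.1, st.2 + 1)
       else st) := by
  unfold pvStepA pvIsOpen pvIsClose
  cases h1 : PySem.Str.startswith (PySem.Str.strip ln) "```mermaid" <;>
    cases h2 : PySem.Str.startswith (PySem.Str.strip ln) "```" <;>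
      simp only [h1, h2] <;> simp

-- the joint loop invariant: A's fold from the outside state equals B's segment scan,
-- and from the inside state equals (count of the current segment) + scan of the remainder
theorem pvFold_invariant : ∀ (block : List String),
    (∀ n : Int, (block.foldl pvStepA (false, n)).2 = n + pvScan (block.map PySem.Str.strip)) ∧
    (∀ n : Int, (block.foldl pvStepA (true, n)).2 =
        n + (((pvSplitClose (block.map PySem.Str.strip)).1.countP pvIsEvent : Int)
             + pvScan (pvSplitClose (block.map PySem.Str.strip)).2)) := by
  intro block
  induction block with
  | nil =>
    constructor <;> intro n <;>
      simp [pvScan_eq, pvDropToOpen, pvSplitClose]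
  | cons ln rest ih =>
    obtain ⟨ihF, ihT⟩ := ih
    constructor <;> intro n <;> simp only [List.foldl_cons, List.map_cons]
    · -- outside state
      cases ho : pvIsOpen (PySem.Str.strip ln)
      · rw [pvScan_cons_not_open _ _ ho]
        have hstep : pvStepA (false, n) ln = (false, n) := by
          rw [pvStepA_eq]; simp [ho]
        rw [hstep, ihF n]
      · rw [pvScan_cons_open _ _ ho]
        have hstep : pvStepA (false, n) ln = (true, n) := by
          rw [pvStepA_eq]; simp [ho]
        rw [hstep, ihT n]
    · -- inside state
      cases ho : pvIsOpen (PySem.Str.strip ln)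
      · cases hc : pvIsClose (PySem.Str.strip ln)
        · -- ordinary in-segment line
          have hev : pvIsEvent (PySem.Str.strip ln) =
              (!PySem.Str.startswith (PySem.Str.strip ln) "title" &&
                PySem.Str.isIn " : " (PySem.Str.strip ln)) := by
            unfold pvIsEvent; unfold pvIsOpen at ho; rw [ho]; simp
          cases ht : PySem.Str.startswith (PySem.Str.strip ln) "title"
          · cases hi : PySem.Str.isIn " : " (PySem.Str.strip ln)
            · have hstep : pvStepA (true, n) ln = (true, n) := by
                rw [pvStepA_eq]; simp only [ho, hc, ht, hi]; simp
              have hev' : pvIsEvent (PySem.Str.strip ln) = false := by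
                rw [hev, ht, hi]; simp
              rw [hstep, ihT n]
              simp [pvSplitClose, hc, hev']
            · have hstep : pvStepA (true, n) ln = (true, n + 1) := by
                rw [pvStepA_eq]; simp only [ho, hc, ht, hi]; simp
              have hev' : pvIsEvent (PySem.Str.strip ln) = true := by
                rw [hev, ht, hi]; simp
              rw [hstep, ihT (n + 1)]
              simp [pvSplitClose, hc, hev']
              omega
          · have hstep : pvStepA (true, n) ln = (true, n) := by
              rw [pvStepA_eq]; simp only [ho, hc, ht]; simp
            have hev' : pvIsEvent (PySem.Str.strip ln) = false := by
              rw [hev, ht]; simp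
            rw [hstep, ihT n]
            simp [pvSplitClose, hc, hev']
        · -- closing fence: back outside, not counted
          have hstep : pvStepA (true, n) ln = (false, n) := by
            rw [pvStepA_eq]; simp [ho, hc]
          rw [hstep, ihF n]
          simp [pvSplitClose, hc]
      · -- a '```mermaid' line inside: stays inside, not counted
        have hstep : pvStepA (true, n) ln = (true, n) := by
          rw [pvStepA_eq]; simp [ho]
        have hcl : pvIsClose (PySem.Str.strip ln) = false := by
          unfold pvIsClose; unfold pvIsOpen at ho; rw [ho]; simp
        have hev : pvIsEvent (PySem.Str.strip ln) = false := by
          unfold pvIsEvent; unfold pvIsOpen at ho; rw [ho]; simp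
        rw [hstep, ihT n]
        simp [pvSplitClose, hcl, hev]

-- ===== VERDICT (by name: the statement is the Claim_ definition above) =====
theorem count_timeline_events_spec : Claim_equal_count_timeline_events := by
  intro block _
  unfold Spec_count_timeline_events count_timeline_events count_timeline_events_alt
  simpa using (pvFold_invariant block).1 0
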